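-- pv_equiv track=rewrite | github.com/connormurphy798/mildredese | lexicon/update_compounds.py | modify_compounds
-- ===== SOURCE A (Python) =====
-- def modify_compounds(modified_uid, modified_word, uid_parent_dict, uid_word_dict):
--     uid_word_dict[modified_uid] = modified_word
--     modified_uids = {modified_uid}
--     num_modified_uids = 0
--     while len(modified_uids) > num_modified_uids:
--         num_modified_uids = len(modified_uids)
--         for uid, parents in uid_parent_dict.items():
--             to_add = False
--             for modified_uid in modified_uids:
--                 if modified_uid in parents:
--                     to_add = True
--             if to_add:
--                 modified_uids.add(uid)
--                 uid_word_dict[uid] = ''.join(uid_word_dict[parent] for parent in parents)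
--     return uid_word_dict
-- ===== SOURCE B (Python) =====
-- def modify_compounds(modified_uid, modified_word, uid_parent_dict, uid_word_dict):
--     uid_word_dict[modified_uid] = modified_word
--     # reverse adjacency: parent uid -> uids whose parent list mentions it
--     children = {}
--     for uid, parents in uid_parent_dict.items():
--         for p in parents:
--             children.setdefault(p, []).append(uid)
--     flagged = set(children.get(modified_uid, ()))   # uids with a modified parent
--     in_set = {modified_uid}
--     changed = True
--     while changed:
--         changed = False
--         for uid, parents in uid_parent_dict.items():
--             if uid in flagged:
--                 if uid not in in_set:
--                     in_set.add(uid)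
--                     changed = True
--                     flagged.update(children.get(uid, ()))
--                 uid_word_dict[uid] = ''.join(uid_word_dict[p] for p in parents)
--     return uid_word_dict
-- ===== Notes on version B (the rewrite author's own statement) =====
-- stated objective: alternative
-- what changed: Instead of scanning the whole modified set against every uid's parent list on every pass, B builds a reverse-adjacency (parent -> children) index once and propagates a 'flagged' mark incrementally to children when a uid first enters the modified set, so each pass tests one flag per uid; the fixed-point pass schedule (and hence every returned word, including on cyclic or order-sensitive graphs) is preserved exactly.
import Mathlib
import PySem

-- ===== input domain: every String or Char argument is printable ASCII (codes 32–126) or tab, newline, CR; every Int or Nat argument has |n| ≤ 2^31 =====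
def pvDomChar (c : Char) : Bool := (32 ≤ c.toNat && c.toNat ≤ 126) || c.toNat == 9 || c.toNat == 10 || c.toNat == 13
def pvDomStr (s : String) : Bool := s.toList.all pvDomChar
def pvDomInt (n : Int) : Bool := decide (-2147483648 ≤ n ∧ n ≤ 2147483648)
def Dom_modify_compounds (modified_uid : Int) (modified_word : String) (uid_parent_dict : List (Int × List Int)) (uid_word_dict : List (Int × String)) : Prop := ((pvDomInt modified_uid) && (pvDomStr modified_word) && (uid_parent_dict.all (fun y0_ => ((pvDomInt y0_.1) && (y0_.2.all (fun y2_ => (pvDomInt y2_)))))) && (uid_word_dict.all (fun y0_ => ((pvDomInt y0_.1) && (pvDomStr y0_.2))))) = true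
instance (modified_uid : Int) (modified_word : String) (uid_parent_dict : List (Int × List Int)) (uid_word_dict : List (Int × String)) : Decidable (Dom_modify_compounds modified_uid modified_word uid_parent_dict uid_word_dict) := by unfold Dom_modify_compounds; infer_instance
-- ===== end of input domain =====

-- B replaces A's per-uid scan of the whole modified set against each parent list by a reverse-adjacency
-- index built once plus incremental flag propagation (objective: alternative; the same pass schedule,
-- so the returned dict is identical, word for word). NOTE: the Python A mutates
-- uid_word_dict in place and returns it; B performs the same mutation, and the equivalence proved here is
-- about the returned dict.

-- ===== PORT A =====
-- ''.join(uid_word_dict[parent] for parent in parents); getD "" stands for d[parent]: exact under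
-- Pre_ (every lookup hits; Python raises KeyError exactly where get? is none, excluded by Pre_)
def pvJoinA (D : PySem.Dict Int String) (ps : List Int) : String :=
  PySem.Str.join "" (ps.map (fun p => D.getD p ""))

-- 'to_add = False; for modified_uid in modified_uids: if modified_uid in parents: to_add = True'
-- (the result depends on the set only through membership, not through Python's hash order)
def pvToAdd (S : PySem.Set Int) (ps : List Int) : Bool :=
  S.foldl (fun b m => b || ps.contains m) false

-- one 'for uid, parents in uid_parent_dict.items():' pass over the running (set, dict) state
def pvPassA (upd : List (Int × List Int)) (st : PySem.Set Int × PySem.Dict Int String) :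
    PySem.Set Int × PySem.Dict Int String :=
  upd.foldl (fun st e =>
    if pvToAdd st.1 e.2 then (PySem.Set.add st.1 e.1, st.2.insert e.1 (pvJoinA st.2 e.2)) else st) st

-- 'while len(modified_uids) > num_modified_uids:'; the set only ever gains keys of uid_parent_dict,
-- so the Python loop tests its condition at most (length + 2) times and this fuel makes the port exact
def pvLoopA (upd : List (Int × List Int)) :
    Nat → PySem.Set Int → Nat → PySem.Dict Int String → PySem.Dict Int String
  | 0, _, _, D => D
  | fuel + 1, S, num, D =>
    if num < S.length then
      let st := pvPassA upd (S, D)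
      pvLoopA upd fuel st.1 S.length st.2
    else D

def modify_compounds (modified_uid : Int) (modified_word : String) (uid_parent_dict : List (Int × List Int)) (uid_word_dict : List (Int × String)) : List (Int × String) :=
  let D := (PySem.Dict.ofList uid_word_dict).insert modified_uid modified_word
  (pvLoopA uid_parent_dict (uid_parent_dict.length + 2) (PySem.Set.add PySem.Set.empty modified_uid) 0 D).items

-- ===== PORT B =====
-- children.setdefault(p, []).append(uid), for every entry and every parent
def pvChildren (upd : List (Int × List Int)) : PySem.Dict Int (List Int) :=
  upd.foldl (fun ch e => e.2.foldl (fun ch p => ch.insert p (ch.getD p [] ++ [e.1])) ch)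
    PySem.Dict.empty

-- one pass of B; state = (flagged, in_set, changed, dict)
def pvPassB (upd : List (Int × List Int)) (ch : PySem.Dict Int (List Int))
    (st : PySem.Set Int × PySem.Set Int × Bool × PySem.Dict Int String) :
    PySem.Set Int × PySem.Set Int × Bool × PySem.Dict Int String :=
  upd.foldl (fun st e =>
    if PySem.Set.contains st.1 e.1 then
      let fl_S_c :=
        if PySem.Set.contains st.2.1 e.1 then (st.1, st.2.1, st.2.2.1)
        else (PySem.Set.update st.1 (ch.getD e.1 []), PySem.Set.add st.2.1 e.1, true)
      (fl_S_c.1, fl_S_c.2.1, fl_S_c.2.2, st.2.2.2.insert e.1 (pvJoinA st.2.2.2 e.2))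
    else st) st

-- 'while changed:'; same bound on the number of passes as A's loop
def pvLoopB (upd : List (Int × List Int)) (ch : PySem.Dict Int (List Int)) :
    Nat → PySem.Set Int → PySem.Set Int → Bool → PySem.Dict Int String → PySem.Dict Int String
  | 0, _, _, _, D => D
  | fuel + 1, fl, S, c, D =>
    if c then
      let st := pvPassB upd ch (fl, S, false, D)
      pvLoopB upd ch fuel st.1 st.2.1 st.2.2.1 st.2.2.2
    else D

def modify_compounds_alt (modified_uid : Int) (modified_word : String) (uid_parent_dict : List (Int × List Int)) (uid_word_dict : List (Int × String)) : List (Int × String) :=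
  let D := (PySem.Dict.ofList uid_word_dict).insert modified_uid modified_word
  let ch := pvChildren uid_parent_dict
  (pvLoopB uid_parent_dict ch (uid_parent_dict.length + 2)
    (PySem.Set.ofList (ch.getD modified_uid [])) (PySem.Set.add PySem.Set.empty modified_uid)
    true D).items

-- ===== PRECONDITION & SPEC =====
-- graph closure: uids reachable from the seed through 'some parent already reached';
-- (length) expansion rounds suffice: a non-stable round adds at least one of the ≤ length keys
def pvReachStep (upd : List (Int × List Int)) (S : PySem.Set Int) : PySem.Set Int :=
  upd.foldl (fun S e => if e.2.any (fun p => PySem.Set.contains S p) then PySem.Set.add S e.1 else S) S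

def pvReach (upd : List (Int × List Int)) : Nat → PySem.Set Int → PySem.Set Int
  | 0, S => S
  | n + 1, S => pvReach upd n (pvReachStep upd S)

-- Pre_ excludes (a) association lists with duplicate keys, which represent no Python dict, and
-- (b) inputs where some parent of a uid reachable from modified_uid has no word entry: there A in
-- general raises KeyError on the join's lookup; when the dict order happens to insert that parent's
-- word before it is first read, A returns, and this closed-form strengthening drops those inputs too.
def Pre_modify_compounds (modified_uid : Int) (modified_word : String) (uid_parent_dict : List (Int × List Int)) (uid_word_dict : List (Int × String)) : Prop :=
  (uid_parent_dict.map Prod.fst).Nodup ∧ (uid_word_dict.map Prod.fst).Nodup ∧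
  ∀ e ∈ uid_parent_dict,
    e.1 ∈ pvReach uid_parent_dict uid_parent_dict.length (PySem.Set.add PySem.Set.empty modified_uid) →
    ∀ p ∈ e.2, p = modified_uid ∨ p ∈ uid_word_dict.map Prod.fst
instance (modified_uid : Int) (modified_word : String) (uid_parent_dict : List (Int × List Int)) (uid_word_dict : List (Int × String)) : Decidable (Pre_modify_compounds modified_uid modified_word uid_parent_dict uid_word_dict) := by unfold Pre_modify_compounds; infer_instance

def pvWitness_modify_compounds : Int × String × (List (Int × List Int)) × (List (Int × String)) :=
  (0, "x", [(1, [0]), (2, [1, 0])], [(0, "a"), (1, "b"), (2, "c")])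

def Spec_modify_compounds (modified_uid : Int) (modified_word : String) (uid_parent_dict : List (Int × List Int)) (uid_word_dict : List (Int × String)) (out : List (Int × String)) : Prop := out = modify_compounds_alt modified_uid modified_word uid_parent_dict uid_word_dict
instance (modified_uid : Int) (modified_word : String) (uid_parent_dict : List (Int × List Int)) (uid_word_dict : List (Int × String)) (out : List (Int × String)) : Decidable (Spec_modify_compounds modified_uid modified_word uid_parent_dict uid_word_dict out) := by unfold Spec_modify_compounds; infer_instance

-- ===== CLAIM (what is proved, stated in full; the proofs are below) =====
def Claim_equal_modify_compounds : Prop := ∀ (modified_uid : Int) (modified_word : String) (uid_parent_dict : List (Int × List Int)) (uid_word_dict : List (Int × String)), Dom_modify_compounds modified_uid modified_word uid_parent_dict uid_word_dict → Pre_modify_compounds modified_uid modified_word uid_parent_dict uid_word_dict → Spec_modify_compounds modified_uid modified_word uid_parent_dict uid_word_dict (modify_compounds modified_uid modified_word uid_parent_dict uid_word_dict)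

-- ===== LEMMAS AND PROOFS =====

theorem foldl_or (f : Int → Bool) : ∀ (l : List Int) (b : Bool),
    l.foldl (fun acc x => acc || f x) b = (b || l.any f) := by
  intro l; induction l with
  | nil => simp
  | cons x xs ih => intro b; simp [List.foldl_cons, ih, Bool.or_assoc]

theorem pvToAdd_iff (S : PySem.Set Int) (ps : List Int) :
    pvToAdd S ps = true ↔ ∃ p ∈ ps, p ∈ S := by
  unfold pvToAdd
  rw [foldl_or (fun m => ps.contains m) S false]
  simp [List.any_eq_true]
  exact ⟨fun ⟨m, hm, hc⟩ => ⟨m, hc, hm⟩, fun ⟨p, hp, hS⟩ => ⟨p, hS, hp⟩⟩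

theorem children_inner (uid : Int) : ∀ (ps : List Int) (ch : PySem.Dict Int (List Int)) (v u : Int),
    u ∈ (ps.foldl (fun ch p => ch.insert p (ch.getD p [] ++ [uid])) ch).getD v [] ↔
      u ∈ ch.getD v [] ∨ (v ∈ ps ∧ u = uid) := by
  intro ps; induction ps with
  | nil => simp
  | cons p rest ih =>
    intro ch v u
    rw [List.foldl_cons, ih]
    rw [PySem.Dict.getD_insert]
    by_cases hv : v = p
    · subst hv; simp [List.mem_append]
      tauto
    · simp only [if_neg hv, List.mem_cons]
      tauto

theorem children_aux : ∀ (l : List (Int × List Int)) (ch : PySem.Dict Int (List Int)) (v u : Int),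
    u ∈ (l.foldl (fun ch e => e.2.foldl (fun ch p => ch.insert p (ch.getD p [] ++ [e.1])) ch) ch).getD v [] ↔
      u ∈ ch.getD v [] ∨ ∃ e ∈ l, e.1 = u ∧ v ∈ e.2 := by
  intro l; induction l with
  | nil => simp
  | cons e rest ih =>
    intro ch v u
    rw [List.foldl_cons, ih, children_inner]
    simp only [List.mem_cons]
    constructor
    · rintro (⟨h | ⟨hv, hu⟩⟩ | ⟨e', he', hk, hp⟩)
      · exact Or.inl h
      · exact Or.inr ⟨e, Or.inl rfl, hu.symm, hv⟩
      · exact Or.inr ⟨e', Or.inr he', hk, hp⟩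
    · rintro (h | ⟨e', (rfl | he'), hk, hp⟩)
      · exact Or.inl (Or.inl h)
      · exact Or.inl (Or.inr ⟨hp, hk.symm⟩)
      · exact Or.inr ⟨e', he', hk, hp⟩

theorem children_mem (upd : List (Int × List Int)) (v u : Int) :
    u ∈ (pvChildren upd).getD v [] ↔ ∃ e ∈ upd, e.1 = u ∧ v ∈ e.2 := by
  unfold pvChildren
  rw [children_aux]
  simp [PySem.Dict.getD_empty]

theorem pvPassA_cons (e : Int × List Int) (rest : List (Int × List Int))
    (st : PySem.Set Int × PySem.Dict Int String) :
    pvPassA (e :: rest) st =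
      pvPassA rest (if pvToAdd st.1 e.2 then (PySem.Set.add st.1 e.1, st.2.insert e.1 (pvJoinA st.2 e.2)) else st) := rfl

theorem pvPassB_cons (ch : PySem.Dict Int (List Int)) (e : Int × List Int)
    (rest : List (Int × List Int))
    (st : PySem.Set Int × PySem.Set Int × Bool × PySem.Dict Int String) :
    pvPassB (e :: rest) ch st =
      pvPassB rest ch
        (if PySem.Set.contains st.1 e.1 then
          let fl_S_c :=
            if PySem.Set.contains st.2.1 e.1 then (st.1, st.2.1, st.2.2.1)
            else (PySem.Set.update st.1 (ch.getD e.1 []), PySem.Set.add st.2.1 e.1, true)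
          (fl_S_c.1, fl_S_c.2.1, fl_S_c.2.2, st.2.2.2.insert e.1 (pvJoinA st.2.2.2 e.2))
        else st) := rfl

theorem pvPassA_nil (st : PySem.Set Int × PySem.Dict Int String) : pvPassA [] st = st := rfl
theorem pvPassB_nil (ch : PySem.Dict Int (List Int))
    (st : PySem.Set Int × PySem.Set Int × Bool × PySem.Dict Int String) :
    pvPassB [] ch st = st := rfl

theorem pass_eq (P : List (Int × List Int)) (hnd : (P.map Prod.fst).Nodup) :
    ∀ (l : List (Int × List Int)), (∀ e ∈ l, e ∈ P) →
    ∀ (S : PySem.Set Int) (D : PySem.Dict Int String) (fl : PySem.Set Int) (c : Bool),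
    (∀ u, u ∈ fl ↔ ∃ e ∈ P, e.1 = u ∧ ∃ p ∈ e.2, p ∈ S) →
    (pvPassB l (pvChildren P) (fl, S, c, D)).2.1 = (pvPassA l (S, D)).1 ∧
    (pvPassB l (pvChildren P) (fl, S, c, D)).2.2.2 = (pvPassA l (S, D)).2 ∧
    (∀ u, u ∈ (pvPassB l (pvChildren P) (fl, S, c, D)).1 ↔
      ∃ e ∈ P, e.1 = u ∧ ∃ p ∈ e.2, p ∈ (pvPassA l (S, D)).1) ∧
    (∃ t, (pvPassA l (S, D)).1 = S ++ t) ∧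
    (pvPassB l (pvChildren P) (fl, S, c, D)).2.2.1 = (c || !decide ((pvPassA l (S, D)).1 = S)) := by
  intro l
  induction l with
  | nil =>
    intro _ S D fl c hInv
    rw [pvPassA_nil, pvPassB_nil]
    exact ⟨rfl, rfl, hInv, ⟨[], by simp⟩, by simp⟩
  | cons e rest ih =>
    intro hl S D fl c hInv
    have heP : e ∈ P := hl e (List.mem_cons_self ..)
    have hrest : ∀ e' ∈ rest, e' ∈ P := fun e' h => hl e' (List.mem_cons_of_mem _ h)
    have hflag : PySem.Set.contains fl e.1 = pvToAdd S e.2 := by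
      by_cases h : pvToAdd S e.2 = true
      · rw [h]
        rcases (pvToAdd_iff S e.2).1 h with ⟨p, hp, hpS⟩
        exact (PySem.Set.contains_iff fl e.1).2 ((hInv e.1).2 ⟨e, heP, rfl, p, hp, hpS⟩)
      · rw [Bool.eq_false_iff.2 h, ← Bool.not_eq_true]
        intro hc
        rcases (hInv e.1).1 ((PySem.Set.contains_iff fl e.1).1 hc) with ⟨e', he', hk, p, hp, hpS⟩
        have he'e : e' = e := List.inj_on_of_nodup_map hnd he' heP hk
        exact h ((pvToAdd_iff S e.2).2 ⟨p, he'e ▸ hp, hpS⟩)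
    rw [pvPassA_cons, pvPassB_cons]
    by_cases hta : pvToAdd S e.2 = true
    · rw [hta] at hflag
      rw [hflag, hta]
      simp only [if_true]
      by_cases hmem : e.1 ∈ S
      · have hcS : PySem.Set.contains S e.1 = true := (PySem.Set.contains_iff S e.1).2 hmem
        have haddS : PySem.Set.add S e.1 = S := PySem.Set.add_of_mem hmem
        rw [hcS]
        simp only [if_true, haddS]
        exact ih hrest S (D.insert e.1 (pvJoinA D e.2)) fl c hInv
      · have hcS : PySem.Set.contains S e.1 = false := by
          rw [← Bool.not_eq_true, PySem.Set.contains_iff]; exact hmem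
        have haddS : PySem.Set.add S e.1 = S ++ [e.1] := PySem.Set.add_of_not_mem hmem
        rw [hcS]
        simp only [Bool.false_eq_true, if_false]
        have hInv2 : ∀ u, u ∈ PySem.Set.update fl ((pvChildren P).getD e.1 []) ↔
            ∃ e' ∈ P, e'.1 = u ∧ ∃ p ∈ e'.2, p ∈ PySem.Set.add S e.1 := by
          intro u
          rw [PySem.Set.mem_update, hInv u, children_mem]
          constructor
          · rintro (⟨e', he', hk, p, hp, hpS⟩ | ⟨e', he', hk, hp⟩)
            · exact ⟨e', he', hk, p, hp, (PySem.Set.mem_add ..).2 (Or.inl hpS)⟩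
            · exact ⟨e', he', hk, e.1, hp, (PySem.Set.mem_add ..).2 (Or.inr rfl)⟩
          · rintro ⟨e', he', hk, p, hp, hpS⟩
            rcases (PySem.Set.mem_add ..).1 hpS with h | h
            · exact Or.inl ⟨e', he', hk, p, hp, h⟩
            · exact Or.inr ⟨e', he', hk, h ▸ hp⟩
        obtain ⟨h1, h2, h3, ⟨t, ht⟩, h5⟩ :=
          ih hrest (PySem.Set.add S e.1) (D.insert e.1 (pvJoinA D e.2))
            (PySem.Set.update fl ((pvChildren P).getD e.1 [])) true hInv2
        refine ⟨h1, h2, h3, ⟨e.1 :: t, by rw [ht, haddS]; simp⟩, ?_⟩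
        rw [h5]
        have hne : ¬ ((pvPassA rest (PySem.Set.add S e.1, D.insert e.1 (pvJoinA D e.2))).1 = S) := by
          rw [ht, haddS]
          intro hcontra
          have hlen := congrArg List.length hcontra
          simp at hlen
        simp [hne]
    · rw [Bool.eq_false_iff.2 hta] at hflag
      rw [hflag, Bool.eq_false_iff.2 hta]
      simp only [Bool.false_eq_true, if_false]
      exact ih hrest S D fl c hInv

theorem loop_eq (P : List (Int × List Int)) (hnd : (P.map Prod.fst).Nodup) :
    ∀ (fuel : Nat) (S : PySem.Set Int) (D : PySem.Dict Int String) (fl : PySem.Set Int)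
      (num : Nat) (c : Bool),
      (∀ u, u ∈ fl ↔ ∃ e ∈ P, e.1 = u ∧ ∃ p ∈ e.2, p ∈ S) →
      c = decide (num < S.length) →
      pvLoopB P (pvChildren P) fuel fl S c D = pvLoopA P fuel S num D := by
  intro fuel
  induction fuel with
  | zero => intro S D fl num c _ _; rfl
  | succ n ih =>
    intro S D fl num c hInv hc
    rw [pvLoopA, pvLoopB, hc]
    by_cases h : num < S.length
    · simp only [h, decide_true, if_true]
      obtain ⟨h1, h2, h3, ⟨t, ht⟩, h5⟩ := pass_eq P hnd P (fun _ h => h) S D fl false hInv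
      rw [h1, h2, h5]
      apply ih _ _ _ _ _ h3
      rcases t with _ | ⟨x, t⟩
      · rw [ht]
        simp
      · rw [ht]
        simp
    · simp only [h, decide_false, Bool.false_eq_true, if_false]


theorem top_eq (muid : Int) (mw : String) (upd : List (Int × List Int)) (uwd : List (Int × String))
    (hnd : (upd.map Prod.fst).Nodup) :
    modify_compounds muid mw upd uwd = modify_compounds_alt muid mw upd uwd := by
  unfold modify_compounds modify_compounds_alt
  apply congrArg PySem.Dict.items
  refine (loop_eq upd hnd _ _ _ _ 0 true ?_ ?_).symm
  · intro u
    rw [PySem.Set.mem_ofList, children_mem]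
    have hadd : PySem.Set.add PySem.Set.empty muid = [muid] := rfl
    rw [hadd]
    constructor
    · rintro ⟨e, he, hk, hp⟩
      exact ⟨e, he, hk, muid, hp, List.mem_singleton.2 rfl⟩
    · rintro ⟨e, he, hk, p, hp, hpS⟩
      exact ⟨e, he, hk, (List.mem_singleton.1 hpS) ▸ hp⟩
  · rfl

-- ===== VERDICT (by name: the statement is the Claim_ definition above) =====
theorem modify_compounds_spec : Claim_equal_modify_compounds := by
  intro muid mw upd uwd _ hpre
  exact top_eq muid mw upd uwd hpre.1
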